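-- pv_equiv track=rewrite | github.com/pypi-data/pypi-mirror-368 | packages/avalan/avalan-1.2.16.tar.gz/avalan-1.2.16/src/avalan/tool/invoice.py | _from_string_row
-- ===== SOURCE A (Python) =====
-- def _from_string_row(row: list[str]) -> list[str]:
--     out, i = [], 0
--     while i < len(row):
--         text = row[i].strip()
--         if text.endswith(":"):
--             nxt = row[i + 1].strip() if i + 1 < len(row) else ""
--             out.append(f"{text} {nxt}".strip())
--             i += 2
--         else:
--             out.append(text)
--             i += 1
--     return out
-- ===== SOURCE B (Python) =====
-- def _from_string_row(row: list[str]) -> list[str]: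
--     out = []
--     pending = None  # a stripped label cell ending with ':' awaiting its value
--     for raw in row:
--         cell = raw.strip()
--         if pending is not None:
--             out.append(f"{pending} {cell}".strip())
--             pending = None
--         elif cell.endswith(":"):
--             pending = cell
--         else:
--             out.append(cell)
--     if pending is not None:
--         out.append(pending)
--     return out
-- ===== Notes on version B (the rewrite author's own statement) =====
-- stated objective: simpler
-- what changed: Replaced the while-loop with index arithmetic and look-ahead (i, i+1, i+=2) by a single forward for-loop carrying one 'pending' label state, appending the merged cell when the state is set.
import Mathlib
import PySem

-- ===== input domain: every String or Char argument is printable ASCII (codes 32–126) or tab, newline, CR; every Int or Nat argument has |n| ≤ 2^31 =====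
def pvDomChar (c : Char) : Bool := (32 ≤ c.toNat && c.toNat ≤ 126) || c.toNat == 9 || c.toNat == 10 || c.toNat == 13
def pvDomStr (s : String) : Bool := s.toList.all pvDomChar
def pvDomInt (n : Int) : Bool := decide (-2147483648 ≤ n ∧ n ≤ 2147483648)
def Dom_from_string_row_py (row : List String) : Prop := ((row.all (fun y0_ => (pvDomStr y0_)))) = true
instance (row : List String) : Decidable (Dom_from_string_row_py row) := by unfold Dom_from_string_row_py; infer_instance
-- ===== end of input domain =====

-- B replaces A's index/look-ahead while loop by one forward pass carrying a pending-label state (simpler; same cost).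

-- ===== PORT A =====
-- while loop over index i, consuming one or two cells per step
def from_string_row_go (row : List String) (i : Nat) : List String :=
  if _h : i < row.length then
    let text := PySem.Str.strip row[i]!
    if PySem.Str.endswith text ":" then
      let nxt := if i + 1 < row.length then PySem.Str.strip row[i+1]! else ""
      PySem.Str.strip (text ++ " " ++ nxt) :: from_string_row_go row (i + 2)
    else
      text :: from_string_row_go row (i + 1)
  else []
termination_by row.length - i

def from_string_row_py (row : List String) : List String := from_string_row_go row 0

-- ===== PORT B =====
-- for loop over the cells carrying a `pending` label state
def from_string_row_alt_go (pending : Option String) (cells : List String) : List String :=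
  match cells with
  | [] =>
    match pending with
    | none => []
    | some p => [p]
  | c :: rest =>
    let cell := PySem.Str.strip c
    match pending with
    | some p => PySem.Str.strip (p ++ " " ++ cell) :: from_string_row_alt_go none rest
    | none =>
      if PySem.Str.endswith cell ":" then from_string_row_alt_go (some cell) rest
      else cell :: from_string_row_alt_go none rest

def from_string_row_py_alt (row : List String) : List String := from_string_row_alt_go none row

-- ===== PRECONDITION & SPEC =====
def Spec_from_string_row_py (row : List String) (out : List String) : Prop := out = from_string_row_py_alt row
instance (row : List String) (out : List String) : Decidable (Spec_from_string_row_py row out) := by unfold Spec_from_string_row_py; infer_instance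

-- ===== CLAIM (what is proved, stated in full; the proofs are below) =====
def Claim_equal_from_string_row_py : Prop := ∀ (row : List String), Dom_from_string_row_py row → Spec_from_string_row_py row (from_string_row_py row)

-- ===== LEMMAS AND PROOFS =====

theorem pv_dropWhile_idem {α : Type} (p : α → Bool) (l : List α) :
    List.dropWhile p (List.dropWhile p l) = List.dropWhile p l := by
  induction l with
  | nil => simp
  | cons a t ih =>
    by_cases h : p a = true
    · simpa [h] using ih
    · simp [h]

theorem pv_dropWhile_of_prefix {α : Type} (p : α → Bool) {l l' : List α}
    (hl : List.dropWhile p l = l) (hp : l' <+: l) :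
    List.dropWhile p l' = l' := by
  cases l' with
  | nil => simp
  | cons a t =>
    cases l with
    | nil => simp at hp
    | cons b s =>
      obtain ⟨u, hu⟩ := hp
      have hab : a = b := by
        have h0 := congrArg (fun xs => xs.head?) hu
        simp at h0
        exact h0
      subst hab
      by_cases h : p a = true
      · exfalso
        rw [List.dropWhile_cons, if_pos h] at hl
        have h1 := congrArg List.length hl
        have h2 := List.length_dropWhile_le p s
        simp at h1
        omega
      · simp [h]

-- the stripped string has no trailing whitespace
theorem pv_dropWhile_reverse_strip (s : List Char) :
    List.dropWhile PySem.Chars.isspace (PySem.Chars.strip s).reverse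
      = (PySem.Chars.strip s).reverse := by
  simp [PySem.Chars.strip, PySem.Chars.rstrip, pv_dropWhile_idem]

-- the stripped string has no leading whitespace
theorem pv_dropWhile_strip (s : List Char) :
    List.dropWhile PySem.Chars.isspace (PySem.Chars.strip s) = PySem.Chars.strip s := by
  have hl : List.dropWhile PySem.Chars.isspace (PySem.Chars.lstrip s) = PySem.Chars.lstrip s :=
    pv_dropWhile_idem _ _
  have hp : PySem.Chars.strip s <+: PySem.Chars.lstrip s := by
    have : List.dropWhile PySem.Chars.isspace (PySem.Chars.lstrip s).reverse
        <:+ (PySem.Chars.lstrip s).reverse := List.dropWhile_suffix _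
    have := List.reverse_prefix.mpr this
    simpa [PySem.Chars.strip, PySem.Chars.rstrip] using this
  exact pv_dropWhile_of_prefix _ hl hp

theorem pv_strip_append_space (s : List Char) :
    PySem.Chars.strip (PySem.Chars.strip s ++ [' ']) = PySem.Chars.strip s := by
  have hno : List.dropWhile PySem.Chars.isspace (PySem.Chars.strip s) = PySem.Chars.strip s :=
    pv_dropWhile_strip s
  have hrev0 := pv_dropWhile_reverse_strip s
  cases ht : PySem.Chars.strip s with
  | nil => decide
  | cons a t =>
    rw [ht] at hno hrev0
    have ha : PySem.Chars.isspace a = false := by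
      by_contra h
      have h' : PySem.Chars.isspace a = true := by
        cases hx : PySem.Chars.isspace a <;> simp_all
      rw [List.dropWhile_cons, if_pos h'] at hno
      have h1 := congrArg List.length hno
      have h2 := List.length_dropWhile_le PySem.Chars.isspace t
      simp at h1
      omega
    have hsp : PySem.Chars.isspace ' ' = true := by decide
    simp only [List.reverse_cons] at hrev0
    simp [PySem.Chars.strip, PySem.Chars.lstrip, PySem.Chars.rstrip,
      ha, hsp, hrev0]

theorem pv_str_strip_append_space (s : String) :
    PySem.Str.strip (PySem.Str.strip s ++ " " ++ "") = PySem.Str.strip s := by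
  apply String.toList_injective
  have h1 : (PySem.Str.strip s ++ " " ++ "").toList = (PySem.Str.strip s).toList ++ [' '] := by
    simp [String.toList_append]
  rw [PySem.Str.toList_strip, h1, PySem.Str.toList_strip]
  exact pv_strip_append_space s.toList

theorem pv_go_eq_alt (row : List String) (i : Nat) :
    from_string_row_go row i = from_string_row_alt_go none (row.drop i) := by
  induction i using from_string_row_go.induct row with
  | case1 i h text hend ih =>
    have e : row[i]! = row[i] := getElem!_pos row i h
    have hend' : PySem.Str.endswith (PySem.Str.strip row[i]) ":" = true := by
      rw [← e]; exact hend
    have hdrop : row.drop i = row[i] :: row.drop (i + 1) := List.drop_eq_getElem_cons h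
    rw [from_string_row_go, dif_pos h]
    simp only [e, hend', if_true, hdrop, from_string_row_alt_go, ih]
    by_cases h2 : i + 1 < row.length
    · have e2 : row[i+1]! = row[i+1] := getElem!_pos row (i+1) h2
      have hdrop2 : row.drop (i + 1) = row[i+1] :: row.drop (i + 2) :=
        List.drop_eq_getElem_cons h2
      simp only [if_pos h2, e2, hdrop2, from_string_row_alt_go]
    · have hdrop2 : row.drop (i + 1) = [] := List.drop_eq_nil_of_le (by omega)
      have hdrop3 : row.drop (i + 2) = [] := List.drop_eq_nil_of_le (by omega)
      simp only [if_neg h2, hdrop2, hdrop3, from_string_row_alt_go]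
      rw [pv_str_strip_append_space]
  | case2 i h text hend ih =>
    have e : row[i]! = row[i] := getElem!_pos row i h
    have hend' : ¬ PySem.Str.endswith (PySem.Str.strip row[i]) ":" = true := by
      rw [← e]; exact hend
    have hdrop : row.drop i = row[i] :: row.drop (i + 1) := List.drop_eq_getElem_cons h
    rw [from_string_row_go, dif_pos h]
    simp only [e, if_neg hend', hdrop, from_string_row_alt_go, ih]
  | case3 i h =>
    rw [from_string_row_go, dif_neg h, List.drop_eq_nil_of_le (by omega),
      from_string_row_alt_go]

-- ===== VERDICT (by name: the statement is the Claim_ definition above) =====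
theorem from_string_row_py_spec : Claim_equal_from_string_row_py := by
  intro row _
  unfold Spec_from_string_row_py from_string_row_py from_string_row_py_alt
  simpa using pv_go_eq_alt row 0
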